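-- pv_equiv track=rewrite | github.com/miles307/CSC101 | lab4.py | removevowels
-- ===== SOURCE A (Python) =====
-- def removevowels(names):
--     vowels = ['a', 'e', 'i', 'o', 'u', 'A', 'E', 'I', 'O', 'U']
--
--     for i in range(len(names) - 1, -1, -1):
--         temp = list(names[i])
--         for j in range(len(vowels)):
--             if temp[0] == vowels[j]:
--                 del names[i]
--                 break
--     for p in range(len(names)):
--         names[p] = names[p].upper()
--
--
--
--     return names
-- ===== SOURCE B (Python) =====
-- def removevowels(names):
--     vowels = {'a', 'e', 'i', 'o', 'u', 'A', 'E', 'I', 'O', 'U'}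
--     names[:] = [n.upper() for n in names if n[0] not in vowels]
--     return names
-- ===== Notes on version B (the rewrite author's own statement) =====
-- stated objective: faster
-- what changed: A's backward index-deletion pass (each del shifts the tail) plus a second in-place uppercase pass are replaced by a single filter+map comprehension assigned back via names[:]; the inner 10-iteration vowel scan becomes a set membership test.
import Mathlib
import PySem

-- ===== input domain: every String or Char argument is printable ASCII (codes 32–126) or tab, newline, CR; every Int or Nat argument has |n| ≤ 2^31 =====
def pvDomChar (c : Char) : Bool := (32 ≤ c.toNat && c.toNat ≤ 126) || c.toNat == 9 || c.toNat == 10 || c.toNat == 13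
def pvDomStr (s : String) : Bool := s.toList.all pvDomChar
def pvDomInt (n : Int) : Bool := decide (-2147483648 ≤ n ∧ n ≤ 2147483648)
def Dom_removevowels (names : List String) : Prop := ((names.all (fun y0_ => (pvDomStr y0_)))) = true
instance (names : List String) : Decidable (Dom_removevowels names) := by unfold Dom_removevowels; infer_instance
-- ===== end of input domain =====

-- B replaces A's backward index-deletion pass + second uppercase pass by one filter+map
-- comprehension (idiomatic). A mutates its argument in place; the equivalence proved here is
-- about the RETURN value only (Source B performs the same in-place rebuild via names[:] = …).

-- ===== PORT A =====
-- inner 'for j in range(len(vowels)): if temp[0] == vowels[j]: … break' loop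
def pvMemLoop (c : Char) : List Char → Bool
  | [] => false
  | v :: vs => if c == v then true else pvMemLoop c vs

-- 'temp = list(names[i]); temp[0] == a vowel' (temp[0] raises on "": none, excluded by Pre_)
def pvIsVowelA (s : String) : Bool :=
  match PySem.List.pyGet? s.toList 0 with
  | some c => pvMemLoop c ['a', 'e', 'i', 'o', 'u', 'A', 'E', 'I', 'O', 'U']
  | none => false

-- 'for p in range(len(names)): names[p] = names[p].upper()' — uppercase each element in turn
def pvUpperLoop : List String → List String
  | [] => []
  | s :: ss => PySem.Str.upper s :: pvUpperLoop ss

def removevowels (names : List String) : List String :=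
  let ns := (PySem.List.pyRange ((names.length : Int) - 1) (-1) (-1)).foldl
    (fun ns i =>
      match PySem.List.pyGet? ns i with
      | some s => if pvIsVowelA s then ns.eraseIdx i.toNat else ns
      | none => ns)  -- unreachable: i is always a valid index
    names
  pvUpperLoop ns

-- ===== PORT B =====
def removevowels_alt (names : List String) : List String :=
  let vowels : PySem.Set Char := PySem.Set.ofList ['a', 'e', 'i', 'o', 'u', 'A', 'E', 'I', 'O', 'U']
  (names.filter (fun n =>
    match PySem.List.pyGet? n.toList 0 with
    | some c => !(PySem.Set.contains vowels c)
    | none => false)).map PySem.Str.upper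

-- ===== PRECONDITION & SPEC =====
-- Pre_ excludes lists containing the empty string, on which A raises IndexError at temp[0].
def Pre_removevowels (names : List String) : Prop := ∀ s ∈ names, s ≠ ""
instance (names : List String) : Decidable (Pre_removevowels names) := by
  unfold Pre_removevowels; infer_instance

def pvWitness_removevowels : List String := ["oak", "Birch", "elm"]

def Spec_removevowels (names : List String) (out : List String) : Prop := out = removevowels_alt names
instance (names : List String) (out : List String) : Decidable (Spec_removevowels names out) := by unfold Spec_removevowels; infer_instance

-- ===== CLAIM (what is proved, stated in full; the proofs are below) =====
def Claim_equal_removevowels : Prop := ∀ (names : List String), Dom_removevowels names → Pre_removevowels names → Spec_removevowels names (removevowels names)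

-- ===== LEMMAS AND PROOFS =====

theorem pvMemLoop_eq_contains (c : Char) (vs : List Char) :
    pvMemLoop c vs = vs.contains c := by
  induction vs with
  | nil => rfl
  | cons v vs ih =>
    simp only [pvMemLoop, List.contains_cons, ih]
    by_cases h : c == v <;> simp [h]

theorem pvUpperLoop_eq_map (ns : List String) :
    pvUpperLoop ns = ns.map PySem.Str.upper := by
  induction ns with
  | nil => rfl
  | cons s ss ih => simp [pvUpperLoop, ih]

theorem pvEraseIdx_append_length {α : Type} (l1 : List α) (x : α) (l2 : List α) :
    (l1 ++ x :: l2).eraseIdx l1.length = l1 ++ l2 := by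
  induction l1 with
  | nil => rfl
  | cons a l ih => simp [ih]

-- backward deletion loop over indices len-1 … 0 of the xs part of xs ++ ys = filter on xs
theorem pvDelLoop_eq_filter (xs ys : List String) :
    (PySem.List.pyRange ((xs.length : Int) - 1) (-1) (-1)).foldl
      (fun ns i =>
        match PySem.List.pyGet? ns i with
        | some s => if pvIsVowelA s then ns.eraseIdx i.toNat else ns
        | none => ns)
      (xs ++ ys)
    = xs.filter (fun s => !pvIsVowelA s) ++ ys := by
  induction xs using List.reverseRecOn generalizing ys with
  | nil =>
    rw [PySem.List.pyRange_neg_one_eq_nil (by norm_num)]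
    simp
  | append_singleton zs x ih =>
    have hlen : ((zs ++ [x]).length : Int) - 1 = (zs.length : Int) := by
      simp
    rw [hlen, PySem.List.pyRange_neg_one_cons (by omega)]
    have hassoc : (zs ++ [x]) ++ ys = zs ++ x :: ys := by simp
    have hget : PySem.List.pyGet? ((zs ++ [x]) ++ ys) ((zs.length : Int)) = some x := by
      rw [hassoc]
      exact PySem.List.pyGet?_append_length zs ys x
    simp only [List.foldl_cons, hget]
    by_cases hv : pvIsVowelA x
    · have herase : ((zs ++ [x]) ++ ys).eraseIdx ((zs.length : Int)).toNat = zs ++ ys := by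
        rw [hassoc, Int.toNat_natCast, pvEraseIdx_append_length]
      simp only [hv, if_true, herase, ih ys]
      simp [List.filter_append, hv]
    · simp only [hv, Bool.false_eq_true, if_false]
      rw [hassoc, ih (x :: ys)]
      simp [List.filter_append, hv]

theorem pvKeep_eq (s : String) (hs : s ≠ "") :
    (!pvIsVowelA s) =
      (match PySem.List.pyGet? s.toList 0 with
       | some c => !(PySem.Set.contains
           (PySem.Set.ofList ['a', 'e', 'i', 'o', 'u', 'A', 'E', 'I', 'O', 'U']) c)
       | none => false) := by
  have hne : s.toList ≠ [] := by
    intro h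
    exact hs (String.toList_eq_nil_iff.mp h)
  cases hlist : s.toList with
  | nil => exact absurd hlist hne
  | cons c cs =>
    rw [pvIsVowelA, hlist]
    simp only [PySem.List.pyGet?_zero_cons]
    rw [pvMemLoop_eq_contains]
    rfl

-- ===== VERDICT (by name: the statement is the Claim_ definition above) =====
theorem removevowels_spec : Claim_equal_removevowels := by
  intro names _hdom hpre
  unfold Spec_removevowels removevowels removevowels_alt
  have h := pvDelLoop_eq_filter names []
  simp only [List.append_nil] at h
  rw [h, pvUpperLoop_eq_map]
  congr 1
  apply List.filter_congr
  intro s hmem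
  exact pvKeep_eq s (hpre s hmem)
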